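-- pv_equiv track=rewrite | github.com/qkek984/ML_study | algorithm/programmers/badUser.py | solution
-- ===== SOURCE A (Python) =====
-- from itertools import combinations
-- from collections import deque
--
-- def solution(user_id, banned_id):
--     answer = 0
--     len_ban_id = len(banned_id)
--     banned_id.sort()
--     ban_info=[]
--     for i in range(len(banned_id)):
--         if i>0 and banned_id[i] == banned_id[i-1]:
--             ban_info[-1][2] += 1
--             continue
--         star=[]
--         for j in range(len(banned_id[i])):
--             if banned_id[i][j]=="*":
--                 star.append(j)
--         ban_info.append([banned_id[i],star,1])
--
--     case = [[] for _ in range(len(ban_info))]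
--     result = [set([])]
--     for i in range(len(ban_info)):
--         ban_id, star, select = ban_info[i]
--         for u_id in user_id:
--             if len(ban_id) != len(u_id):
--                 continue
--             tmp_id = u_id
--             for idx in star:
--                 tmp_id = tmp_id[:idx]+"*"+tmp_id[idx+1:]
--             if tmp_id == ban_id:
--                 case[i].append(u_id)
--         combs = combinations(case[i],select)
--         new_result = []
--         for comb in combs:
--             comb = set(comb)
--             for r in result:
--                 new_result.append(r.union(set(comb)))
--         result = new_result
--     result=deque(result)
--     while result:
--         r = result.popleft()
--         if (len(r) == len_ban_id) and (not r in result):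
--              answer += 1
--     return answer
-- ===== SOURCE B (Python) =====
-- def solution(user_id, banned_id):
--     banned_id.sort()  # keep A's in-place sort side effect
--
--     def match(pat, u):
--         return len(pat) == len(u) and all(p == '*' or p == c for p, c in zip(pat, u))
--
--     found = []  # distinct chosen-sets found so far
--
--     def dfs(pats, chosen):
--         if not pats:
--             if chosen not in found:
--                 found.append(chosen)
--             return
--         pat = pats[0]
--         for u in user_id:
--             if u in chosen or not match(pat, u):
--                 continue
--             dfs(pats[1:], chosen | {u})
--
--     dfs(banned_id, set())
--     return len(found)
-- ===== Notes on version B (the rewrite author's own statement) =====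
-- stated objective: alternative
-- what changed: Replaces A's pipeline (run-length grouping of the sorted patterns, per-group itertools.combinations, a cartesian product of unions over all groups, then a deque-based duplicate-and-size filter) by direct recursive backtracking: dfs walks the pattern list, extends the chosen set with one matching not-yet-chosen user per pattern, and records each complete chosen set once.
import Mathlib
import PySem

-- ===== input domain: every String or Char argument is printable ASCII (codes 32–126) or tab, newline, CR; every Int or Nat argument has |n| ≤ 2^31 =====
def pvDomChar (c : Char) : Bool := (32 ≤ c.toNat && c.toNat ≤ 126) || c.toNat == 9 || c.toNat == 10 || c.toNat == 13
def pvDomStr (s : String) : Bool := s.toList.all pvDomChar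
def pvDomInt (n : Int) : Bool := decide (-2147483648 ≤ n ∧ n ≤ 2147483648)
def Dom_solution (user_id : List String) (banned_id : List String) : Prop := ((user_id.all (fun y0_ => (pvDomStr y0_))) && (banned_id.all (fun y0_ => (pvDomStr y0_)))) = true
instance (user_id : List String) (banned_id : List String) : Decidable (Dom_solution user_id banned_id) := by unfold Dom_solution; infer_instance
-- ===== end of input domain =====

-- B replaces A's pipeline (run-length grouping of the sorted patterns, per-group combinations, a
-- cartesian product of unions, then a deque-based size-and-duplicate count) by recursive
-- backtracking over the pattern list (objective: alternative, same exponential worst case).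
-- Like A, the Python B sorts banned_id in place (same side effect); the equivalence proved here is
-- about the return value.

-- ===== PORT A =====

def pvStars (pat : List Char) : List Nat :=
  (List.range pat.length).foldl (fun acc j => if pat.getD j ' ' = '*' then acc ++ [j] else acc) []

def pvMask (stars : List Nat) (u : List Char) : List Char :=
  stars.foldl (fun t idx => t.take idx ++ '*' :: t.drop (idx + 1)) u

-- the ban_info loop: compare with the previous element, bump the last triple's count or append
def pvBanStep (st : Option String × List (String × List Nat × Nat)) (s : String) :
    Option String × List (String × List Nat × Nat) :=
  if st.1 = some s then
    (some s, st.2.dropLast ++ (match st.2.getLast? with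
      | some (p, stars, c) => [(p, stars, c + 1)]
      | none => []))
  else
    (some s, st.2 ++ [(s, pvStars s.toList, 1)])

def pvBanInfo (l : List String) : List (String × List Nat × Nat) :=
  (l.foldl pvBanStep ((none : Option String), ([] : List (String × List Nat × Nat)))).2

def pvCase (user_id : List String) (g : String × List Nat × Nat) : List String :=
  user_id.foldl (fun cs u =>
    if g.1.toList.length ≠ u.toList.length then cs
    else if pvMask g.2.1 u.toList = g.1.toList then cs ++ [u] else cs) []

-- one group of the result loop: combs = combinations(case[i], select);
-- new_result = [r.union(set(comb)) for comb in combs for r in result]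
def pvResultStep (user_id : List String) (result : List (PySem.Set String))
    (g : String × List Nat × Nat) : List (PySem.Set String) :=
  (PySem.List.combinations (pvCase user_id g) g.2.2).foldl
    (fun nr comb => nr ++ result.map (fun r => PySem.Set.union r (PySem.Set.ofList comb))) []

-- the final deque loop: count r with len(r) == len_ban_id and r not in the remaining deque
def pvCount (n : Nat) : List (PySem.Set String) → Int
  | [] => 0
  | r :: rest =>
      (if r.length = n ∧ (rest.any (fun s => PySem.Set.equal r s)) = false then (1 : Int) else 0)
        + pvCount n rest

def solution (user_id : List String) (banned_id : List String) : Int :=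
  let lenBan := banned_id.length
  let sortedB := PySem.List.sorted banned_id (fun x => x) false
  let info := pvBanInfo sortedB
  let result := info.foldl (pvResultStep user_id) [PySem.Set.empty]
  pvCount lenBan result

-- ===== PORT B =====

def pvMatch (pat u : List Char) : Bool :=
  pat.length == u.length && (pat.zip u).all (fun pc => pc.1 == '*' || pc.1 == pc.2)

-- dfs(pats, chosen): the `for u in user_id` loop is the recursion over the third argument;
-- `found` is threaded through; a skipped user continues the loop with `found` unchanged
def pvDfs (user_id : List String) :
    List String → List String → PySem.Set String → List (PySem.Set String) → List (PySem.Set String)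
  | [], _, chosen, found =>
      if found.any (fun s => PySem.Set.equal chosen s) then found else found ++ [chosen]
  | _ :: _, [], _, found => found
  | p :: rest, u :: us, chosen, found =>
      pvDfs user_id (p :: rest) us chosen
        (if PySem.Set.contains chosen u || !pvMatch p.toList u.toList then found
         else pvDfs user_id rest user_id (PySem.Set.add chosen u) found)

def solution_alt (user_id : List String) (banned_id : List String) : Int :=
  let sortedB := PySem.List.sorted banned_id (fun x => x) false
  ((pvDfs user_id sortedB user_id PySem.Set.empty []).length : Int)

-- ===== PRECONDITION & SPEC =====
def Spec_solution (user_id : List String) (banned_id : List String) (out : Int) : Prop := out = solution_alt user_id banned_id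
instance (user_id : List String) (banned_id : List String) (out : Int) : Decidable (Spec_solution user_id banned_id out) := by unfold Spec_solution; infer_instance

-- ===== CLAIM (what is proved, stated in full; the proofs are below) =====
def Claim_equal_solution : Prop := ∀ (user_id : List String) (banned_id : List String), Dom_solution user_id banned_id → Spec_solution user_id banned_id (solution user_id banned_id)

-- ===== LEMMAS AND PROOFS =====

-- proof-side notions: the match relation, the common predicate pvP, reachable sets of the dfs
def pvR (user_id : List String) (p u : String) : Prop :=
  u ∈ user_id ∧ pvMatch p.toList u.toList = true

def pvP (user_id : List String) (pats : List String) (t : Finset String) : Prop :=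
  ∃ us : List String, us.Nodup ∧ List.Forall₂ (pvR user_id) pats us ∧ us.toFinset = t

def pvExt (user_id : List String) : List String → List String → PySem.Set String → Finset String → Prop
  | [], _, chosen, t => t = chosen.toFinset
  | p :: rest, users, chosen, t =>
      ∃ u ∈ users, u ∉ chosen ∧ pvMatch p.toList u.toList = true ∧
        pvExt user_id rest user_id (PySem.Set.add chosen u) t

theorem pvStars_aux {α : Type} (p : α → Bool) (l : List α) (acc : List α) :
    l.foldl (fun acc j => if p j then acc ++ [j] else acc) acc = acc ++ l.filter p := by
  induction l generalizing acc with
  | nil => simp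
  | cons x xs ih =>
    by_cases h : p x <;> simp [List.foldl_cons, h, ih]

theorem pvMem_stars (pat : List Char) (j : Nat) :
    j ∈ pvStars pat ↔ ∃ h : j < pat.length, pat[j] = '*' := by
  have : pvStars pat = (List.range pat.length).filter (fun j => decide (pat.getD j ' ' = '*')) := by
    unfold pvStars
    simpa using pvStars_aux (fun j => decide (pat.getD j ' ' = '*')) (List.range pat.length) []
  rw [this]
  simp only [List.mem_filter, List.mem_range, decide_eq_true_eq]
  constructor
  · rintro ⟨h, he⟩
    exact ⟨h, by rwa [List.getD_eq_getElem _ _ h] at he⟩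
  · rintro ⟨h, he⟩
    exact ⟨h, by rwa [List.getD_eq_getElem _ _ h]⟩

theorem pvMask_set (stars : List Nat) (u : List Char) (hs : ∀ i ∈ stars, i < u.length) :
    pvMask stars u = stars.foldl (fun t i => t.set i '*') u := by
  unfold pvMask
  induction stars generalizing u with
  | nil => rfl
  | cons i is ih =>
    have hi : i < u.length := hs i (by simp)
    simp only [List.foldl_cons]
    rw [← List.set_eq_take_cons_drop _ hi, ih]
    intro j hj
    rw [List.length_set]
    exact hs j (by simp [hj])

theorem pvFoldl_set_getElem (stars : List Nat) (u : List Char) (j : Nat)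
    (hj : j < (stars.foldl (fun t i => t.set i '*') u).length) (hju : j < u.length) :
    (stars.foldl (fun t i => t.set i '*') u)[j] = if j ∈ stars then '*' else u[j] := by
  induction stars generalizing u with
  | nil => simp
  | cons i is ih =>
    simp only [List.foldl_cons] at *
    rw [ih _ (by simpa using hj) (by simpa using hju)]
    by_cases hji : j ∈ is
    · simp [hji]
    · by_cases hevent : j = i
      · subst hevent; simp [hji]
      · simp [hji, hevent, Ne.symm hevent]

theorem pvFoldl_set_length (stars : List Nat) (u : List Char) :
    (stars.foldl (fun t i => t.set i '*') u).length = u.length := by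
  induction stars generalizing u with
  | nil => rfl
  | cons i is ih => simp [List.foldl_cons, ih]

def pvPt (pat u : List Char) : Prop :=
  ∀ j (h1 : j < pat.length) (h2 : j < u.length), pat[j] = '*' ∨ pat[j] = u[j]

theorem pvMask_eq_forall (pat u : List Char) (hlen : u.length = pat.length) :
    pvMask (pvStars pat) u = pat ↔ pvPt pat u := by
  have hst : ∀ i ∈ pvStars pat, i < u.length := by
    intro i hi; rcases (pvMem_stars pat i).1 hi with ⟨h, _⟩; omega
  rw [pvMask_set _ _ hst]
  have hlenf := pvFoldl_set_length (pvStars pat) u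
  constructor
  · intro h j hj hj2
    have heq : (List.foldl (fun t i => t.set i '*') u (pvStars pat))[j]'(by omega) = pat[j] := by
      simp only [h]
    rw [pvFoldl_set_getElem _ _ j (by omega) hj2] at heq
    by_cases hm : j ∈ pvStars pat
    · left; simpa [hm] using heq.symm
    · right; simpa [hm] using heq.symm
  · intro h
    apply List.ext_getElem (by omega)
    intro j h1 h2
    rw [pvFoldl_set_getElem _ _ j h1 (by omega)]
    by_cases hm : j ∈ pvStars pat
    · rcases (pvMem_stars pat j).1 hm with ⟨_, he⟩; simp [hm, he]
    · have hne : ¬ pat[j] = '*' := by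
        intro he; exact hm ((pvMem_stars pat j).2 ⟨h2, he⟩)
      rcases h j h2 (by omega) with he | he
      · exact absurd he hne
      · simp [hm, he]

theorem pvMatch_iff (pat u : List Char) :
    pvMatch pat u = true ↔ u.length = pat.length ∧ pvPt pat u := by
  unfold pvMatch
  rw [Bool.and_eq_true, beq_iff_eq, List.all_eq_true]
  constructor
  · rintro ⟨hl, hall⟩
    refine ⟨hl.symm, ?_⟩
    intro j hj hj2
    have hjz : j < (pat.zip u).length := by simp [List.length_zip]; omega
    have hz := hall _ (List.getElem_mem hjz)
    simp only [List.getElem_zip] at hz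
    rw [Bool.or_eq_true] at hz
    rcases hz with h | h
    · left; exact beq_iff_eq.1 h
    · right; exact beq_iff_eq.1 h
  · rintro ⟨hl, hall⟩
    refine ⟨hl.symm, ?_⟩
    intro pc hpc
    rcases List.mem_iff_getElem.1 hpc with ⟨j, hj, rfl⟩
    have hj1 : j < pat.length := by simp [List.length_zip] at hj; omega
    have hj2 : j < u.length := by simp [List.length_zip] at hj; omega
    simp only [List.getElem_zip]
    rcases hall j hj1 hj2 with h | h
    · simp [h]
    · simp [h]

theorem pvMask_iff_match (pat u : List Char) (hlen : u.length = pat.length) :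
    pvMask (pvStars pat) u = pat ↔ pvMatch pat u = true := by
  rw [pvMask_eq_forall pat u hlen, pvMatch_iff]
  simp [hlen]

theorem pvCase_aux (g : String × List Nat × Nat) (hg : g.2.1 = pvStars g.1.toList)
    (l : List String) (acc : List String) :
    l.foldl (fun cs u =>
      if g.1.toList.length ≠ u.toList.length then cs
      else if pvMask g.2.1 u.toList = g.1.toList then cs ++ [u] else cs) acc
    = acc ++ l.filter (fun u => pvMatch g.1.toList u.toList) := by
  induction l generalizing acc with
  | nil => simp
  | cons u us ih =>
    have step :
        (if g.1.toList.length ≠ u.toList.length then acc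
          else if pvMask g.2.1 u.toList = g.1.toList then acc ++ [u] else acc)
        = if pvMatch g.1.toList u.toList then acc ++ [u] else acc := by
      by_cases hlen : g.1.toList.length = u.toList.length
      · rw [if_neg (by omega), hg]
        by_cases hm : pvMask (pvStars g.1.toList) u.toList = g.1.toList
        · rw [if_pos hm, if_pos ((pvMask_iff_match _ _ hlen.symm).1 hm)]
        · rw [if_neg hm, if_neg (fun hmm => hm ((pvMask_iff_match _ _ hlen.symm).2 hmm))]
      · rw [if_pos (by omega),
          if_neg (fun hmm => hlen ((pvMatch_iff _ _).1 hmm).1.symm)]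
    rw [List.foldl_cons, step, List.filter_cons]
    by_cases hm : pvMatch g.1.toList u.toList
    · simp only [hm, if_pos, ih]
      simp
    · simp only [hm, ih]
      simp

theorem pvCase_eq_filter (user_id : List String) (g : String × List Nat × Nat)
    (hg : g.2.1 = pvStars g.1.toList) :
    pvCase user_id g = user_id.filter (fun u => pvMatch g.1.toList u.toList) := by
  unfold pvCase
  simpa using pvCase_aux g hg user_id []

-- ---- Finset / Forall₂ helpers ----

theorem pvFoldr_union_append (l1 l2 : List (Finset String)) :
    ((l1 ++ l2).foldr (· ∪ ·) ∅) = (l1.foldr (· ∪ ·) ∅) ∪ (l2.foldr (· ∪ ·) ∅) := by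
  induction l1 with
  | nil => simp
  | cons x xs ih => simp [ih, Finset.union_assoc]

theorem pvToFinset_flatten (cs : List (List String)) :
    (cs.flatten).toFinset = (cs.map List.toFinset).foldr (· ∪ ·) ∅ := by
  induction cs with
  | nil => simp
  | cons c cs ih => simp [ih]

theorem pvNodup_of_card_eq (l : List String) (h : l.toFinset.card = l.length) : l.Nodup := by
  induction l with
  | nil => simp
  | cons x xs ih =>
    by_cases hx : x ∈ xs
    · exfalso
      have hx' : x ∈ xs.toFinset := List.mem_toFinset.2 hx
      have h1 : (x :: xs).toFinset = xs.toFinset := by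
        rw [List.toFinset_cons, Finset.insert_eq_self.2 hx']
      have h2 := xs.toFinset_card_le
      rw [h1] at h
      simp at h
      omega
    · have hx' : x ∉ xs.toFinset := fun hc => hx (List.mem_toFinset.1 hc)
      have h1 : (x :: xs).toFinset.card = xs.toFinset.card + 1 := by
        rw [List.toFinset_cons, Finset.card_insert_of_notMem hx']
      rw [h1] at h
      simp at h
      exact List.Nodup.cons hx (ih h)

theorem pvChunks_nodup (uss : List (List String)) (h : uss.flatten.Nodup) :
    ∀ c ∈ uss, c.Nodup := by
  induction uss with
  | nil => simp
  | cons c cs ih =>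
    rw [List.flatten_cons] at h
    intro d hd
    rcases List.mem_cons.1 hd with rfl | hd
    · exact h.of_append_left
    · exact ih h.of_append_right d hd

theorem pvForall₂_append_inv {α β : Type} {R : α → β → Prop} {l₁ l₂ : List α} {us : List β}
    (h : List.Forall₂ R (l₁ ++ l₂) us) :
    ∃ u₁ u₂, us = u₁ ++ u₂ ∧ List.Forall₂ R l₁ u₁ ∧ List.Forall₂ R l₂ u₂ := by
  induction l₁ generalizing us with
  | nil => exact ⟨[], us, rfl, List.Forall₂.nil, h⟩
  | cons a l ih =>
    cases h with
    | cons hab htail =>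
      rcases ih htail with ⟨u₁, u₂, rfl, h1, h2⟩
      exact ⟨_ :: u₁, u₂, rfl, List.Forall₂.cons hab h1, h2⟩

theorem pvForall₂_singleton_inv {α β : Type} {R : α → β → Prop} {a : α} {us : List β}
    (h : List.Forall₂ R [a] us) : ∃ u, us = [u] ∧ R a u := by
  cases h with
  | cons hab htail => cases htail; exact ⟨_, rfl, hab⟩

theorem pvForall₂_flatten_inv {α β : Type} {R : α → β → Prop} {ls : List (List α)} {us : List β}
    (h : List.Forall₂ R ls.flatten us) :
    ∃ uss, us = uss.flatten ∧ List.Forall₂ (List.Forall₂ R) ls uss := by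
  induction ls generalizing us with
  | nil => cases h; exact ⟨[], rfl, List.Forall₂.nil⟩
  | cons c ls ih =>
    rw [List.flatten_cons] at h
    rcases pvForall₂_append_inv h with ⟨u₁, u₂, rfl, h1, h2⟩
    rcases ih h2 with ⟨uss, rfl, h3⟩
    exact ⟨u₁ :: uss, rfl, List.Forall₂.cons h1 h3⟩

theorem pvForall₂_replicate_left {α β : Type} {R : α → β → Prop} (p : α) :
    ∀ (c : List β), (∀ u ∈ c, R p u) → List.Forall₂ R (List.replicate c.length p) c := by
  intro c
  induction c with
  | nil => intro _; exact List.Forall₂.nil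
  | cons u us ih =>
    intro h
    rw [List.length_cons, List.replicate_succ]
    exact List.Forall₂.cons (h u (by simp)) (ih (fun v hv => h v (by simp [hv])))

theorem pvForall₂_replicate_inv {α β : Type} {R : α → β → Prop} {p : α} :
    ∀ {k : Nat} {c : List β}, List.Forall₂ R (List.replicate k p) c →
      c.length = k ∧ ∀ u ∈ c, R p u := by
  intro k
  induction k with
  | zero =>
    intro c h
    rw [List.replicate_zero] at h
    cases h
    exact ⟨rfl, by simp⟩
  | succ k ih =>
    intro c h
    rw [List.replicate_succ] at h
    cases h with
    | cons hab ht =>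
      rcases ih ht with ⟨hl, hall⟩
      refine ⟨by simp [hl], ?_⟩
      intro u hu
      rcases List.mem_cons.1 hu with rfl | hu
      · exact hab
      · exact hall _ hu

theorem pvForall₂_flatten_length {α β : Type} {ls : List (List α)} {us : List (List β)}
    (h : List.Forall₂ (fun (c : List α) (d : List β) => c.length = d.length) ls us) :
    ls.flatten.length = us.flatten.length := by
  induction h with
  | nil => rfl
  | cons h1 _ ih => simp only [List.flatten_cons, List.length_append, h1, ih]

-- ---- PySem.Set toFinset bridges ----

theorem pvToFinset_union (r s : PySem.Set String) :
    (PySem.Set.union r s).toFinset = r.toFinset ∪ s.toFinset := by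
  ext x
  simp [PySem.Set.mem_union r s x]

theorem pvToFinset_ofList (l : List String) :
    (PySem.Set.ofList l).toFinset = l.toFinset := by
  ext x
  simp [PySem.Set.mem_ofList]

theorem pvToFinset_add (s : PySem.Set String) (x : String) :
    (PySem.Set.add s x).toFinset = insert x s.toFinset := by
  ext y
  simp [PySem.Set.mem_add]
  tauto

theorem pvEqual_iff_toFinset (r s : PySem.Set String) :
    PySem.Set.equal r s = true ↔ r.toFinset = s.toFinset := by
  rw [PySem.Set.equal_iff, Finset.ext_iff]
  simp

-- ---- the counting loop ----

theorem pvCount_eq_dedup (n : Nat) (l : List (PySem.Set String)) (hl : ∀ r ∈ l, r.Nodup) :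
    pvCount n l = (((l.map List.toFinset).filter (fun t => t.card = n)).dedup.length : Int) := by
  induction l with
  | nil => simp [pvCount]
  | cons r rest ih =>
    have hr : r.Nodup := hl r (by simp)
    have hcard : r.toFinset.card = r.length := List.toFinset_card_of_nodup hr
    have ihh := ih (fun s hs => hl s (by simp [hs]))
    have hmem_iff : (rest.any fun s => PySem.Set.equal r s) = true ↔
        r.toFinset ∈ rest.map List.toFinset := by
      rw [List.any_eq_true]
      constructor
      · rintro ⟨s, hs, heq⟩
        exact List.mem_map.2 ⟨s, hs, ((pvEqual_iff_toFinset r s).1 heq).symm⟩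
      · intro hc
        rcases List.mem_map.1 hc with ⟨s, hs, hts⟩
        exact ⟨s, hs, (pvEqual_iff_toFinset r s).2 hts.symm⟩
    simp only [pvCount]
    rw [ihh, List.map_cons, List.filter_cons]
    by_cases hn : r.length = n
    · rw [if_pos (show decide (r.toFinset.card = n) = true by simp [hcard, hn])]
      by_cases hmem : (rest.any fun s => PySem.Set.equal r s) = true
      · have hin : r.toFinset ∈ (rest.map List.toFinset).filter
            (fun t => decide (t.card = n)) :=
          List.mem_filter.2 ⟨hmem_iff.1 hmem, by simp [hcard, hn]⟩
        rw [List.dedup_cons_of_mem hin, if_neg (by simp [hmem])]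
        simp
      · have hnotin : r.toFinset ∉ (rest.map List.toFinset).filter
            (fun t => decide (t.card = n)) := by
          intro hc
          exact hmem (hmem_iff.2 (List.mem_filter.1 hc).1)
        rw [List.dedup_cons_of_notMem hnotin,
          if_pos ⟨hn, by simpa using hmem⟩]
        simp only [List.length_cons]
        push_cast
        ring
    · rw [if_neg (show ¬ decide (r.toFinset.card = n) = true by simp [hcard, hn]),
        if_neg (fun hc => hn hc.1)]
      simp

-- ---- ban_info is a run-length encoding ----

def pvInv (l₀ : List String) (st : Option String × List (String × List Nat × Nat)) : Prop :=
  st.1 = l₀.getLast? ∧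
  ((st.2).map (fun g => List.replicate g.2.2 g.1)).flatten = l₀ ∧
  (∀ g ∈ st.2, g.2.1 = pvStars g.1.toList) ∧
  (match st.1 with
   | none => st.2 = []
   | some p => ∃ pre stc c, st.2 = pre ++ [(p, stc, c)])

theorem pvBanStep_inv (l₀ : List String) (st : Option String × List (String × List Nat × Nat))
    (h : pvInv l₀ st) (s : String) : pvInv (l₀ ++ [s]) (pvBanStep st s) := by
  obtain ⟨h1, h2, h3, h4⟩ := h
  obtain ⟨prev, info⟩ := st
  by_cases hp : prev = some s
  · subst hp
    simp only at h4
    rcases h4 with ⟨pre, stc, c, rfl⟩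
    have hstep : pvBanStep (some s, pre ++ [(s, stc, c)]) s
        = (some s, pre ++ [(s, stc, c + 1)]) := by
      unfold pvBanStep
      rw [if_pos rfl]
      simp
    rw [hstep]
    refine ⟨by simp, ?_, ?_, pre, stc, c + 1, rfl⟩
    · simp only [List.map_append, List.map_cons, List.map_nil, List.flatten_append,
        List.flatten_cons, List.flatten_nil] at h2 ⊢
      rw [List.replicate_succ']
      rw [← h2]
      simp
    · intro g hg
      rcases List.mem_append.1 hg with hg | hg
      · exact h3 g (by simp [List.mem_append, hg])
      · simp only [List.mem_singleton] at hg
        subst hg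
        exact h3 (s, stc, c) (by simp)
  · have hstep : pvBanStep (prev, info) s
        = (some s, info ++ [(s, pvStars s.toList, 1)]) := by
      unfold pvBanStep
      rw [if_neg hp]
    rw [hstep]
    refine ⟨by simp, ?_, ?_, info, pvStars s.toList, 1, rfl⟩
    · simp only [List.map_append, List.map_cons, List.map_nil, List.flatten_append,
        List.flatten_cons, List.flatten_nil, List.replicate_one] at h2 ⊢
      rw [h2]
      simp
    · intro g hg
      rcases List.mem_append.1 hg with hg | hg
      · exact h3 g hg
      · simp only [List.mem_singleton] at hg
        subst hg
        rfl

theorem pvFoldl_ban_inv : ∀ (l l₀ : List String) st, pvInv l₀ st →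
    pvInv (l₀ ++ l) (l.foldl pvBanStep st) := by
  intro l
  induction l with
  | nil => intro l₀ st h; simpa using h
  | cons s rest ih =>
    intro l₀ st h
    have h' := pvBanStep_inv l₀ st h s
    have := ih (l₀ ++ [s]) _ h'
    simpa using this

theorem pvBanInfo_inv (l : List String) :
    ((pvBanInfo l).map (fun g => List.replicate g.2.2 g.1)).flatten = l ∧
    ∀ g ∈ pvBanInfo l, g.2.1 = pvStars g.1.toList := by
  have h0 : pvInv [] ((none : Option String), ([] : List (String × List Nat × Nat))) := by
    refine ⟨by simp, by simp, by simp, by simp⟩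
  have := pvFoldl_ban_inv l [] _ h0
  simp only [List.nil_append] at this
  exact ⟨this.2.1, this.2.2.1⟩

-- ---- A-side characterization ----

theorem pvForall₂_append {α β : Type} {R : α → β → Prop} {l₁ l₂ : List α} {u₁ u₂ : List β}
    (h1 : List.Forall₂ R l₁ u₁) (h2 : List.Forall₂ R l₂ u₂) :
    List.Forall₂ R (l₁ ++ l₂) (u₁ ++ u₂) := by
  induction h1 with
  | nil => exact h2
  | cons hab _ ih => exact List.Forall₂.cons hab ih

theorem pvForall₂_flatten_of {α β : Type} {R : α → β → Prop} {ls : List (List α)}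
    {us : List (List β)} (h : List.Forall₂ (List.Forall₂ R) ls us) :
    List.Forall₂ R ls.flatten us.flatten := by
  induction h with
  | nil => exact List.Forall₂.nil
  | cons h1 _ ih =>
    rw [List.flatten_cons, List.flatten_cons]
    exact pvForall₂_append h1 ih

theorem pvForall₂_and_left {α β : Type} {R : α → β → Prop} {P : α → Prop} :
    ∀ {l : List α} {u : List β}, List.Forall₂ R l u → (∀ a ∈ l, P a) →
      List.Forall₂ (fun a b => R a b ∧ P a) l u := by
  intro l u h
  induction h with
  | nil => intro _; exact List.Forall₂.nil
  | cons hab _ ih =>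
    intro hmem
    exact List.Forall₂.cons ⟨hab, hmem _ (by simp)⟩ (ih (fun a ha => hmem a (by simp [ha])))

theorem pvResultStep_mem (user_id : List String) (result : List (PySem.Set String))
    (g : String × List Nat × Nat) (r' : PySem.Set String) :
    r' ∈ pvResultStep user_id result g ↔
      ∃ comb ∈ PySem.List.combinations (pvCase user_id g) g.2.2,
        ∃ r ∈ result, r' = PySem.Set.union r (PySem.Set.ofList comb) := by
  unfold pvResultStep
  rw [PySem.List.foldl_append_eq_flatMap]
  simp only [List.nil_append, List.mem_flatMap, List.mem_map]
  constructor
  · rintro ⟨comb, hc, r, hr, rfl⟩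
    exact ⟨comb, hc, r, hr, rfl⟩
  · rintro ⟨comb, hc, r, hr, rfl⟩
    exact ⟨comb, hc, r, hr, rfl⟩

theorem pvResult_nodup (user_id : List String) :
    ∀ (info : List (String × List Nat × Nat)) (init : List (PySem.Set String)),
      (∀ r ∈ init, r.Nodup) → ∀ r ∈ info.foldl (pvResultStep user_id) init, r.Nodup := by
  intro info
  induction info with
  | nil =>
    intro init h
    simpa using h
  | cons gp rest ih =>
    intro init h
    rw [List.foldl_cons]
    apply ih
    intro r hr
    rw [pvResultStep_mem] at hr
    rcases hr with ⟨comb, _, r0, hr0, rfl⟩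
    exact PySem.Set.nodup_union _ _ (h r0 hr0)

theorem pvResult_char (user_id : List String) (info : List (String × List Nat × Nat)) :
    ∀ (t : Finset String),
      (∃ r ∈ info.foldl (pvResultStep user_id) [PySem.Set.empty], r.toFinset = t) ↔
      (∃ cs : List (List String),
        List.Forall₂ (fun g c => c ∈ PySem.List.combinations (pvCase user_id g) g.2.2) info cs ∧
        (cs.map List.toFinset).foldr (· ∪ ·) ∅ = t) := by
  induction info using List.reverseRecOn with
  | nil =>
    intro t
    constructor
    · rintro ⟨r, hr, rfl⟩
      simp only [List.foldl_nil, List.mem_singleton] at hr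
      subst hr
      exact ⟨[], List.Forall₂.nil, by simp [PySem.Set.empty]⟩
    · rintro ⟨cs, hcs, rfl⟩
      cases hcs
      exact ⟨PySem.Set.empty, by simp, by simp [PySem.Set.empty]⟩
  | append_singleton info gp ih =>
    intro t
    rw [List.foldl_append]
    simp only [List.foldl_cons, List.foldl_nil]
    constructor
    · rintro ⟨r', hr', rfl⟩
      rw [pvResultStep_mem] at hr'
      rcases hr' with ⟨comb, hcomb, r, hr, rfl⟩
      rcases (ih r.toFinset).1 ⟨r, hr, rfl⟩ with ⟨cs, hcs, hts⟩
      refine ⟨cs ++ [comb], pvForall₂_append hcs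
        (List.Forall₂.cons hcomb List.Forall₂.nil), ?_⟩
      rw [List.map_append, pvFoldr_union_append]
      simp only [List.map_cons, List.map_nil, List.foldr_cons, List.foldr_nil]
      rw [pvToFinset_union, pvToFinset_ofList, hts]
      simp
    · rintro ⟨cs', hcs', rfl⟩
      rcases pvForall₂_append_inv hcs' with ⟨cs, c2, rfl, hcs, hc2⟩
      rcases pvForall₂_singleton_inv hc2 with ⟨comb, rfl, hcomb⟩
      rcases (ih ((cs.map List.toFinset).foldr (· ∪ ·) ∅)).2 ⟨cs, hcs, rfl⟩ with ⟨r, hr, hrt⟩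
      refine ⟨PySem.Set.union r (PySem.Set.ofList comb), ?_, ?_⟩
      · rw [pvResultStep_mem]
        exact ⟨comb, hcomb, r, hr, rfl⟩
      · rw [pvToFinset_union, pvToFinset_ofList, hrt]
        rw [List.map_append, pvFoldr_union_append]
        simp

-- ---- the middle equivalence ----

theorem pvChoose_combs (user_id : List String) :
    ∀ {info : List (String × List Nat × Nat)} {uss : List (List String)},
      List.Forall₂ (fun g c => List.Forall₂ (pvR user_id) (List.replicate g.2.2 g.1) c ∧
        g.2.1 = pvStars g.1.toList) info uss →
      (∀ c ∈ uss, c.Nodup) →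
      ∃ cs : List (List String),
        List.Forall₂ (fun g c => c ∈ PySem.List.combinations (pvCase user_id g) g.2.2) info cs ∧
        (cs.map List.toFinset).foldr (· ∪ ·) ∅ = (uss.map List.toFinset).foldr (· ∪ ·) ∅ := by
  intro info uss h
  induction h with
  | nil =>
    intro _
    exact ⟨[], List.Forall₂.nil, rfl⟩
  | @cons g c info' uss' hgc _ ih =>
    intro hnd
    obtain ⟨hfa, hstg⟩ := hgc
    rcases ih (fun d hd => hnd d (by simp [hd])) with ⟨cs', hcs', hfold⟩
    have hcnd : c.Nodup := hnd c (by simp)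
    rcases pvForall₂_replicate_inv hfa with ⟨hclen, hcall⟩
    have hsub : ∀ u ∈ c, u ∈ pvCase user_id g := by
      intro u hu
      rw [pvCase_eq_filter user_id g hstg, List.mem_filter]
      exact ⟨(hcall u hu).1, (hcall u hu).2⟩
    set c' := ((pvCase user_id g).dedup).filter (fun u => decide (u ∈ c)) with hc'
    have hc'mem : ∀ u, u ∈ c' ↔ u ∈ c := by
      intro u
      rw [hc', List.mem_filter, List.mem_dedup]
      constructor
      · rintro ⟨_, h2⟩
        exact of_decide_eq_true h2
      · intro hu
        exact ⟨hsub u hu, decide_eq_true hu⟩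
    have hc'nd : c'.Nodup := List.Nodup.filter _ (List.nodup_dedup _)
    have hc'fin : c'.toFinset = c.toFinset := by
      ext x
      simp only [List.mem_toFinset]
      exact hc'mem x
    have hc'len : c'.length = g.2.2 := by
      rw [← List.toFinset_card_of_nodup hc'nd, hc'fin, List.toFinset_card_of_nodup hcnd, hclen]
    refine ⟨c' :: cs', List.Forall₂.cons ?_ hcs', ?_⟩
    · rw [PySem.List.mem_combinations_iff]
      exact ⟨List.filter_sublist.trans (List.dedup_sublist _), hc'len⟩
    · simp only [List.map_cons, List.foldr_cons]
      rw [hfold, hc'fin]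

theorem pvA_iff_P (user_id : List String) (info : List (String × List Nat × Nat))
    (hst : ∀ g ∈ info, g.2.1 = pvStars g.1.toList) (t : Finset String) (n : Nat)
    (hn : n = ((info.map (fun g => List.replicate g.2.2 g.1)).flatten).length) :
    ((∃ cs : List (List String),
        List.Forall₂ (fun g c => c ∈ PySem.List.combinations (pvCase user_id g) g.2.2) info cs ∧
        (cs.map List.toFinset).foldr (· ∪ ·) ∅ = t) ∧ t.card = n) ↔
      pvP user_id ((info.map (fun g => List.replicate g.2.2 g.1)).flatten) t := by
  constructor
  · rintro ⟨⟨cs, hcs, rfl⟩, hcard⟩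
    have hcs' := pvForall₂_and_left hcs hst
    have hrep : List.Forall₂ (List.Forall₂ (pvR user_id))
        (info.map (fun g => List.replicate g.2.2 g.1)) cs := by
      rw [List.forall₂_map_left_iff]
      refine hcs'.imp ?_
      intro g c hgc
      obtain ⟨hcomb, hstg⟩ := hgc
      rcases (PySem.List.mem_combinations_iff _ _ _).1 hcomb with ⟨hsub, hclen⟩
      have : ∀ u ∈ c, pvR user_id g.1 u := by
        intro u hu
        have hu' := hsub.mem hu
        rw [pvCase_eq_filter user_id g hstg, List.mem_filter] at hu'
        exact ⟨hu'.1, hu'.2⟩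
      rw [← hclen]
      exact pvForall₂_replicate_left g.1 c this
    have hfa : List.Forall₂ (pvR user_id)
        ((info.map (fun g => List.replicate g.2.2 g.1)).flatten) cs.flatten :=
      pvForall₂_flatten_of hrep
    have hlen : ((info.map (fun g => List.replicate g.2.2 g.1)).flatten).length
        = cs.flatten.length :=
      pvForall₂_flatten_length (hrep.imp (fun _ _ h => List.Forall₂.length_eq h))
    have hfin : cs.flatten.toFinset = (cs.map List.toFinset).foldr (· ∪ ·) ∅ :=
      pvToFinset_flatten cs
    have hnodup : cs.flatten.Nodup := by
      apply pvNodup_of_card_eq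
      rw [hfin, hcard, hn, hlen]
    exact ⟨cs.flatten, hnodup, hfa, hfin⟩
  · rintro ⟨us, hnd, hfa, rfl⟩
    rcases pvForall₂_flatten_inv hfa with ⟨uss, rfl, hsplit⟩
    rw [List.forall₂_map_left_iff] at hsplit
    have hsplit' := pvForall₂_and_left hsplit hst
    rcases pvChoose_combs user_id hsplit' (pvChunks_nodup uss hnd) with ⟨cs, hcs, hfold⟩
    have hlen : ((info.map (fun g => List.replicate g.2.2 g.1)).flatten).length
        = uss.flatten.length := by
      apply pvForall₂_flatten_length
      rw [List.forall₂_map_left_iff]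
      exact hsplit.imp (fun _ _ h => List.Forall₂.length_eq h)
    refine ⟨⟨cs, hcs, ?_⟩, ?_⟩
    · rw [hfold, ← pvToFinset_flatten]
    · rw [List.toFinset_card_of_nodup hnd, hn, hlen]

-- ---- B-side characterization ----

theorem pvExt_cons_cons (user_id : List String) (p : String) (rest : List String)
    (u : String) (us : List String) (chosen : PySem.Set String) (t : Finset String) :
    pvExt user_id (p :: rest) (u :: us) chosen t ↔
      ((u ∉ chosen ∧ pvMatch p.toList u.toList = true ∧
        pvExt user_id rest user_id (PySem.Set.add chosen u) t) ∨
       pvExt user_id (p :: rest) us chosen t) := by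
  simp only [pvExt, List.mem_cons]
  constructor
  · rintro ⟨v, (rfl | hv), hnc, hm, hext⟩
    · exact Or.inl ⟨hnc, hm, hext⟩
    · exact Or.inr ⟨v, hv, hnc, hm, hext⟩
  · rintro (⟨hnc, hm, hext⟩ | ⟨v, hv, hnc, hm, hext⟩)
    · exact ⟨u, Or.inl rfl, hnc, hm, hext⟩
    · exact ⟨v, Or.inr hv, hnc, hm, hext⟩

theorem pvDfs_char (user_id : List String) :
    ∀ (pats users : List String) (chosen : PySem.Set String) (found : List (PySem.Set String)),
      chosen.Nodup → (found.map List.toFinset).Nodup → (∀ r ∈ found, r.Nodup) →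
      ((pvDfs user_id pats users chosen found).map List.toFinset).Nodup ∧
      (∀ r ∈ pvDfs user_id pats users chosen found, r.Nodup) ∧
      (∀ t : Finset String,
        t ∈ (pvDfs user_id pats users chosen found).map List.toFinset ↔
          t ∈ found.map List.toFinset ∨ pvExt user_id pats users chosen t) := by
  intro pats
  induction pats with
  | nil =>
    intro users chosen found hch hnd hfn
    by_cases hmem : (found.any fun s => PySem.Set.equal chosen s) = true
    · rw [pvDfs, if_pos hmem]
      refine ⟨hnd, hfn, ?_⟩
      intro t
      simp only [pvExt]
      rw [List.any_eq_true] at hmem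
      rcases hmem with ⟨s, hs, heq⟩
      constructor
      · intro h
        exact Or.inl h
      · rintro (h | rfl)
        · exact h
        · exact List.mem_map.2 ⟨s, hs, ((pvEqual_iff_toFinset chosen s).1 heq).symm⟩
    · rw [pvDfs, if_neg hmem]
      have hnotin : chosen.toFinset ∉ found.map List.toFinset := by
        intro hc
        rcases List.mem_map.1 hc with ⟨s, hs, hts⟩
        exact hmem (List.any_eq_true.2 ⟨s, hs, (pvEqual_iff_toFinset chosen s).2 hts.symm⟩)
      refine ⟨?_, ?_, ?_⟩
      · rw [List.map_append]
        simp only [List.map_cons, List.map_nil]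
        exact List.Nodup.append hnd (List.nodup_singleton _)
          (by
            intro a ha hb
            simp only [List.mem_singleton] at hb
            subst hb
            exact hnotin ha)
      · intro r hr
        rcases List.mem_append.1 hr with hr | hr
        · exact hfn r hr
        · simp only [List.mem_singleton] at hr
          subst hr
          exact hch
      · intro t
        rw [List.map_append]
        simp only [List.map_cons, List.map_nil, List.mem_append, List.mem_singleton, pvExt]
  | cons p rest ihp =>
    intro users
    induction users with
    | nil =>
      intro chosen found hch hnd hfn
      rw [pvDfs]
      refine ⟨hnd, hfn, ?_⟩
      intro t
      simp only [pvExt, List.not_mem_nil]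
      simp
    | cons u us ihu =>
      intro chosen found hch hnd hfn
      by_cases hok : (PySem.Set.contains chosen u || !pvMatch p.toList u.toList) = true
      · rw [pvDfs, if_pos hok]
        have hres := ihu chosen found hch hnd hfn
        refine ⟨hres.1, hres.2.1, ?_⟩
        intro t
        rw [hres.2.2 t, pvExt_cons_cons]
        rw [Bool.or_eq_true, PySem.Set.contains_iff, Bool.not_eq_eq_eq_not, Bool.not_true] at hok
        constructor
        · rintro (h | h)
          · exact Or.inl h
          · exact Or.inr (Or.inr h)
        · rintro (h | (⟨hnc, hm, _⟩ | h))
          · exact Or.inl h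
          · rcases hok with hok | hok
            · exact absurd hok hnc
            · rw [hm] at hok
              cases hok
          · exact Or.inr h
      · rw [pvDfs, if_neg hok]
        rw [Bool.or_eq_true, not_or, PySem.Set.contains_iff, Bool.not_eq_eq_eq_not,
          Bool.not_true, Bool.not_eq_false] at hok
        obtain ⟨hnc, hm⟩ := hok
        have hinner := ihp user_id (PySem.Set.add chosen u)
          found (PySem.Set.nodup_add chosen u hch) hnd hfn
        have houter := ihu chosen _ hch hinner.1 hinner.2.1
        refine ⟨houter.1, houter.2.1, ?_⟩
        intro t
        rw [houter.2.2 t, hinner.2.2 t, pvExt_cons_cons]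
        constructor
        · rintro ((h | h) | h)
          · exact Or.inl h
          · exact Or.inr (Or.inl ⟨hnc, hm, h⟩)
          · exact Or.inr (Or.inr h)
        · rintro (h | (⟨_, _, h⟩ | h))
          · exact Or.inl (Or.inl h)
          · exact Or.inl (Or.inr h)
          · exact Or.inr h

theorem pvExt_iff_P (user_id : List String) :
    ∀ (pats : List String) (chosen : PySem.Set String), chosen.Nodup → ∀ t : Finset String,
      (pvExt user_id pats user_id chosen t ↔
        ∃ us : List String, us.Nodup ∧ (∀ u ∈ us, u ∉ chosen) ∧
          List.Forall₂ (pvR user_id) pats us ∧ chosen.toFinset ∪ us.toFinset = t) := by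
  intro pats
  induction pats with
  | nil =>
    intro chosen hch t
    simp only [pvExt]
    constructor
    · rintro rfl
      exact ⟨[], by simp, by simp, List.Forall₂.nil, by simp⟩
    · rintro ⟨us, _, _, hfa, h⟩
      cases hfa
      simpa using h.symm
  | cons p rest ih =>
    intro chosen hch t
    simp only [pvExt]
    constructor
    · rintro ⟨u, hu, hnc, hm, hext⟩
      rcases (ih (PySem.Set.add chosen u) (PySem.Set.nodup_add chosen u hch) t).1 hext
        with ⟨us, hnd, hout, hfa, hun⟩
      have hnotu : u ∉ us := by
        intro hc
        exact hout u hc ((PySem.Set.mem_add chosen u u).2 (Or.inr rfl))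
      refine ⟨u :: us, List.Nodup.cons hnotu hnd, ?_, List.Forall₂.cons ⟨hu, hm⟩ hfa, ?_⟩
      · intro v hv
        rcases List.mem_cons.1 hv with rfl | hv
        · exact hnc
        · intro hc
          exact hout v hv ((PySem.Set.mem_add chosen u v).2 (Or.inl hc))
      · rw [pvToFinset_add] at hun
        rw [← hun]
        ext x
        simp only [Finset.mem_union, Finset.mem_insert, List.toFinset_cons, List.mem_toFinset]
        tauto
    · rintro ⟨us, hnd, hout, hfa, hun⟩
      cases hfa with
      | cons hR hfa' =>
        rename_i u us'
        obtain ⟨hu_mem, hmatch⟩ := hR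
        refine ⟨u, hu_mem, hout u (by simp), hmatch, ?_⟩
        rw [ih (PySem.Set.add chosen u) (PySem.Set.nodup_add chosen u hch)]
        refine ⟨us', (List.nodup_cons.1 hnd).2, ?_, hfa', ?_⟩
        · intro v hv hc
          rcases (PySem.Set.mem_add chosen u v).1 hc with hc | rfl
          · exact hout v (by simp [hv]) hc
          · exact (List.nodup_cons.1 hnd).1 hv
        · rw [pvToFinset_add]
          rw [← hun]
          ext x
          simp only [Finset.mem_union, Finset.mem_insert, List.toFinset_cons, List.mem_toFinset]
          tauto

-- ---- assembly ----

theorem pvP_of_parts (user_id S : List String) (t : Finset String) :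
    (∃ us : List String, us.Nodup ∧ (∀ u ∈ us, u ∉ (PySem.Set.empty : PySem.Set String)) ∧
      List.Forall₂ (pvR user_id) S us ∧
      (PySem.Set.empty : PySem.Set String).toFinset ∪ us.toFinset = t) ↔
    pvP user_id S t := by
  unfold pvP
  constructor
  · rintro ⟨us, hnd, _, hfa, hun⟩
    refine ⟨us, hnd, hfa, ?_⟩
    simpa [PySem.Set.empty] using hun
  · rintro ⟨us, hnd, hfa, rfl⟩
    exact ⟨us, hnd, by simp [PySem.Set.empty], hfa, by simp [PySem.Set.empty]⟩


-- ===== VERDICT (by name: the statement is the Claim_ definition above) =====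
theorem solution_spec : Claim_equal_solution := by
  unfold Claim_equal_solution
  intro user_id banned_id _
  unfold Spec_solution solution solution_alt
  set S := PySem.List.sorted banned_id (fun x => x) false with hS
  set info := pvBanInfo S with hinfo
  set result := info.foldl (pvResultStep user_id) [PySem.Set.empty] with hresult
  set found := pvDfs user_id S user_id PySem.Set.empty [] with hfound
  have hbinv := pvBanInfo_inv S
  have hflat : ((info.map (fun g => List.replicate g.2.2 g.1)).flatten) = S := hbinv.1
  have hlenS : S.length = banned_id.length := PySem.List.length_sorted banned_id (fun x => x) false
  have hresnd : ∀ r ∈ result, r.Nodup := by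
    apply pvResult_nodup user_id info [PySem.Set.empty]
    intro r hr
    simp only [List.mem_singleton] at hr
    subst hr
    exact List.nodup_nil
  have hdfs := pvDfs_char user_id S user_id PySem.Set.empty [] List.nodup_nil
    List.nodup_nil (by simp)
  -- both sides count the same finite collection of Finsets
  have hmemA : ∀ t : Finset String,
      t ∈ ((result.map List.toFinset).filter (fun t => t.card = banned_id.length)).dedup ↔
        pvP user_id S t := by
    intro t
    rw [List.mem_dedup, List.mem_filter, decide_eq_true_eq]
    have h1 : t ∈ result.map List.toFinset ↔ ∃ r ∈ result, r.toFinset = t := by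
      rw [List.mem_map]
    rw [h1, pvResult_char user_id info t]
    have := pvA_iff_P user_id info hbinv.2 t banned_id.length
      (by rw [hflat, hlenS])
    rw [hflat] at this
    exact this
  have hmemB : ∀ t : Finset String, t ∈ found.map List.toFinset ↔ pvP user_id S t := by
    intro t
    rw [hdfs.2.2 t]
    simp only [List.map_nil, List.not_mem_nil, false_or]
    rw [pvExt_iff_P user_id S PySem.Set.empty List.nodup_nil t]
    exact pvP_of_parts user_id S t
  have hperm : ((result.map List.toFinset).filter (fun t => t.card = banned_id.length)).dedup.Perm
      (found.map List.toFinset) := by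
    rw [List.perm_ext_iff_of_nodup (List.nodup_dedup _) hdfs.1]
    intro t
    rw [hmemA t, hmemB t]
  rw [pvCount_eq_dedup banned_id.length result hresnd]
  rw [hperm.length_eq, List.length_map]
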